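-- pv_equiv track=rewrite | github.com/izzatbekulkanov/Library | app/core/auth.py | menu_key_from_path
-- ===== SOURCE A (Python) =====
-- MENU_ITEMS: tuple[tuple[str, str, str], ...] = (
--     ("dashboard", "Dashboard", "/"),
--     ("users", "Foydalanuvchilar", "/users"),
--     ("libraries", "Kutubxonalar", "/libraries"),
--     ("book_types", "Kitob turlari", "/book_types"),
--     ("authors", "Mualliflar", "/authors"),
--     ("publishers", "Nashriyotlar", "/publishers"),
--     ("books", "Kitoblar", "/books"),
--     ("online_books", "Online kitoblar", "/online-books"),
--     ("external_books", "Tashqi baza", "/external-books"),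
--     ("reports", "Hisobotlar", "/reports"),
--     ("sozlamalar", "Sozlamalar", "/sozlamalar"),
--     ("about", "Men haqimda", "/about"),
-- )
--
-- def menu_key_from_path(path: str) -> str | None:
--     p = (path or "").strip()
--     if not p:
--         return None
--     if p == "/":
--         return "dashboard"
--     for key, _, base_path in MENU_ITEMS:
--         if key == "dashboard":
--             continue
--         if p == base_path or p.startswith(base_path + "/"):
--             return key
--     return None
-- ===== SOURCE B (Python) =====
-- MENU_ITEMS: tuple[tuple[str, str, str], ...] = (
--     ("dashboard", "Dashboard", "/"),
--     ("users", "Foydalanuvchilar", "/users"),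
--     ("libraries", "Kutubxonalar", "/libraries"),
--     ("book_types", "Kitob turlari", "/book_types"),
--     ("authors", "Mualliflar", "/authors"),
--     ("publishers", "Nashriyotlar", "/publishers"),
--     ("books", "Kitoblar", "/books"),
--     ("online_books", "Online kitoblar", "/online-books"),
--     ("external_books", "Tashqi baza", "/external-books"),
--     ("reports", "Hisobotlar", "/reports"),
--     ("sozlamalar", "Sozlamalar", "/sozlamalar"),
--     ("about", "Men haqimda", "/about"),
-- )
--
-- # table: leading path segment -> menu key (dashboard handled separately)
-- MENU_BY_BASE = {base: key for key, _, base in MENU_ITEMS if key != "dashboard"}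
--
-- def _leading_segment(p: str) -> str:
--     idx = p.find("/", 1)
--     return p if idx == -1 else p[:idx]
--
-- def menu_key_from_path(path: str) -> str | None:
--     p = (path or "").strip()
--     if not p:
--         return None
--     if p == "/":
--         return "dashboard"
--     return MENU_BY_BASE.get(_leading_segment(p))
-- ===== Notes on version B (the rewrite author's own statement) =====
-- stated objective: idiomatic
-- what changed: A's ordered scan over MENU_ITEMS with a startswith test per item is replaced by extracting the leading path segment once (find '/' from index 1, slice) and a single lookup in a precomputed base_path->key table.
import Mathlib
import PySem

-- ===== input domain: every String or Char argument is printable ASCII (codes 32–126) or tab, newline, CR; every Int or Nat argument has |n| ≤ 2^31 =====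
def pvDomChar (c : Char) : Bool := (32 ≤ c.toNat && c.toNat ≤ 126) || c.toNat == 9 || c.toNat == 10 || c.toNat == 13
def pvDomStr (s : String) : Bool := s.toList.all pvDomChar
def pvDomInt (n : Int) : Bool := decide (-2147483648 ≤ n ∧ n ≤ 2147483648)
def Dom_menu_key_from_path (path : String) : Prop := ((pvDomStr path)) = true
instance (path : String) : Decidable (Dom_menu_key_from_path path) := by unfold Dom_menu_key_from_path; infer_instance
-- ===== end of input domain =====

-- B replaces A's ordered startswith-scan over MENU_ITEMS by extracting the leading
-- path segment once and looking it up in a precomputed base→key table (idiomatic).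

-- ===== PORT A =====
def pvMenuItems : List (String × String × String) :=
  [("dashboard", "Dashboard", "/"),
   ("users", "Foydalanuvchilar", "/users"),
   ("libraries", "Kutubxonalar", "/libraries"),
   ("book_types", "Kitob turlari", "/book_types"),
   ("authors", "Mualliflar", "/authors"),
   ("publishers", "Nashriyotlar", "/publishers"),
   ("books", "Kitoblar", "/books"),
   ("online_books", "Online kitoblar", "/online-books"),
   ("external_books", "Tashqi baza", "/external-books"),
   ("reports", "Hisobotlar", "/reports"),
   ("sozlamalar", "Sozlamalar", "/sozlamalar"),
   ("about", "Men haqimda", "/about")]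

-- the 'for key, _, base_path in MENU_ITEMS' loop with its early return
def pvMenuScan (p : String) : List (String × String × String) → Option String
  | [] => none
  | (key, _, base_path) :: rest =>
    if key = "dashboard" then pvMenuScan p rest
    else if p = base_path ∨ PySem.Str.startswith p (base_path ++ "/") = true then some key
    else pvMenuScan p rest

def menu_key_from_path (path : String) : Option String :=
  let p := PySem.Str.strip path
  if p = "" then none
  else if p = "/" then some "dashboard"
  else pvMenuScan p pvMenuItems

-- ===== PORT B =====
-- MENU_BY_BASE = {base: key for key, _, base in MENU_ITEMS if key != "dashboard"}
def pvMenuByBase : PySem.Dict String String :=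
  pvMenuItems.foldl
    (fun d kb => if kb.1 = "dashboard" then d else d.insert kb.2.2 kb.1)
    PySem.Dict.empty

-- idx = p.find("/", 1); p if idx == -1 else p[:idx]
def pvLeadingSegment (p : String) : String :=
  let idx := PySem.Str.findFrom p "/" 1
  if idx = -1 then p else PySem.Str.slice p none (some idx)

def menu_key_from_path_alt (path : String) : Option String :=
  let p := PySem.Str.strip path
  if p = "" then none
  else if p = "/" then some "dashboard"
  else PySem.Dict.get? pvMenuByBase (pvLeadingSegment p)

-- ===== PRECONDITION & SPEC =====
def Spec_menu_key_from_path (path : String) (out : Option String) : Prop := out = menu_key_from_path_alt path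
instance (path : String) (out : Option String) : Decidable (Spec_menu_key_from_path path out) := by unfold Spec_menu_key_from_path; infer_instance

-- ===== CLAIM (what is proved, stated in full; the proofs are below) =====
def Claim_equal_menu_key_from_path : Prop := ∀ (path : String), Dom_menu_key_from_path path → Spec_menu_key_from_path path (menu_key_from_path path)

-- ===== LEMMAS AND PROOFS =====

-- singleton-prefix helper: ['/'] <+: l ↔ l starts with '/'
theorem pv_singleton_prefix {a : Char} {l : List Char} : [a] <+: l ↔ ∃ t, l = a :: t := by
  constructor
  · rintro ⟨t, ht⟩; exact ⟨t, by simpa using ht.symm⟩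
  · rintro ⟨t, rfl⟩; exact ⟨t, rfl⟩

theorem pv_mem_of_infix_needed {l : List Char} (h : '/' ∈ l) : ['/'] <:+: l := by
  obtain ⟨s, t, rfl⟩ := List.append_of_mem h
  exact ⟨s, t, by simp⟩

-- THE MASTER LEMMA: A's per-item test holds iff the leading segment equals the base
theorem pv_master (p b : String) (bs : List Char)
    (hp : p.toList ≠ []) (hb : b.toList = '/' :: bs) (hbs : '/' ∉ bs) :
    ((p = b ∨ PySem.Str.startswith p (b ++ "/") = true) ↔ pvLeadingSegment p = b) := by
  obtain ⟨c, cs, hpl⟩ : ∃ c cs, p.toList = c :: cs := by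
    cases h : p.toList with
    | nil => exact absurd h hp
    | cons c cs => exact ⟨c, cs, rfl⟩
  have hsw : (PySem.Str.startswith p (b ++ "/") = true) ↔ ('/' :: (bs ++ ['/'])) <+: (c :: cs) := by
    rw [PySem.Str.startswith_eq, PySem.Chars.startswith_iff, String.toList_append, hb, hpl]
    simp
  have hpb : (p = b) ↔ (c = '/' ∧ cs = bs) := by
    rw [← String.toList_inj, hpl, hb, List.cons_eq_cons]
  have hff : PySem.Str.findFrom p "/" 1 =
      (if PySem.Chars.find cs ['/'] = -1 then -1 else 1 + PySem.Chars.find cs ['/']) := by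
    rw [PySem.Str.findFrom_eq]
    have h1 : (1 : ℤ) = ((1 : ℕ) : ℤ) := by norm_num
    have hsl : "/".toList = ['/'] := rfl
    rw [h1, PySem.Chars.findFrom_natCast p.toList "/".toList 1 (by rw [hpl]; simp), hsl, hpl]
    norm_num
  by_cases hc : PySem.Chars.find cs ['/'] = -1
  · -- no further '/', the candidate is p itself
    have hnotin : '/' ∉ cs := by
      intro hm
      exact (PySem.Chars.find_eq_neg_one_iff cs ['/']).mp hc (pv_mem_of_infix_needed hm)
    have hcand : pvLeadingSegment p = p := by
      unfold pvLeadingSegment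
      rw [hff, if_pos hc]
      simp
    rw [hcand]
    constructor
    · rintro (h | h)
      · exact h
      · exfalso
        obtain ⟨hcc, hpre⟩ := List.cons_prefix_cons.mp (hsw.mp h)
        obtain ⟨t, ht⟩ := hpre
        apply hnotin
        rw [← ht]
        simp
    · exact Or.inl
  · -- first '/' in cs at index f
    set f := PySem.Chars.find cs ['/'] with hfdef
    have hf0 : 0 ≤ f := by
      have := PySem.Chars.neg_one_le_find cs ['/']
      omega
    obtain ⟨hpre, hmin⟩ := PySem.Chars.find_spec (s := cs) (sub := ['/']) hf0
    obtain ⟨t, hdrop⟩ := pv_singleton_prefix.mp hpre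
    have hmem : '/' ∈ cs := by
      have : '/' ∈ cs.drop f.toNat := by rw [hdrop]; simp
      exact List.mem_of_mem_drop this
    have hcand : (pvLeadingSegment p).toList = c :: cs.take f.toNat := by
      unfold pvLeadingSegment
      rw [hff, if_neg hc, if_neg (by omega)]
      rw [PySem.Str.toList_slice, PySem.Chars.slice_eq_listSlice,
        PySem.List.slice_to _ (by omega : (0:ℤ) ≤ 1 + f), hpl]
      have : ((1 + f).toNat) = f.toNat + 1 := by omega
      rw [this, List.take_succ_cons]
    have hcandb : (pvLeadingSegment p = b) ↔ (c = '/' ∧ cs.take f.toNat = bs) := by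
      rw [← String.toList_inj, hcand, hb, List.cons_eq_cons]
    rw [hcandb]
    have hkey : (bs ++ ['/'] <+: cs) ↔ cs.take f.toNat = bs := by
      constructor
      · rintro ⟨t2, ht2⟩
        have ht2' : bs ++ '/' :: t2 = cs := by simpa using ht2
        have hget : cs[f.toNat]? = some '/' := by
          rw [← List.head?_drop, hdrop]; rfl
        have hlen : f.toNat = bs.length := by
          rcases lt_trichotomy f.toNat bs.length with hlt | heq | hgt
          · exfalso
            apply hbs
            rw [← ht2', List.getElem?_append_left hlt] at hget
            exact List.mem_of_getElem? hget
          · exact heq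
          · exfalso
            apply hmin bs.length hgt
            have hdl : cs.drop bs.length = '/' :: t2 := by
              rw [← ht2', List.drop_left]
            rw [hdl]
            exact ⟨t2, rfl⟩
        rw [hlen, ← ht2', List.take_left]
      · intro htake
        refine ⟨t, ?_⟩
        have : bs ++ ['/'] ++ t = bs ++ '/' :: t := by simp
        rw [this, ← htake, ← hdrop, List.take_append_drop]
    constructor
    · rintro (h | h)
      · exfalso
        obtain ⟨_, hcsbs⟩ := hpb.mp h
        rw [hcsbs] at hmem
        exact hbs hmem
      · obtain ⟨hcc, hpre2⟩ := List.cons_prefix_cons.mp (hsw.mp h)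
        exact ⟨hcc.symm, hkey.mp hpre2⟩
    · rintro ⟨hcc, htake⟩
      right
      apply hsw.mpr
      rw [List.cons_prefix_cons]
      exact ⟨hcc.symm, hkey.mpr htake⟩

-- the dict lookup as an explicit first-match chain
def pvChain (cand : String) : Option String :=
  if cand = "/users" then some "users"
  else if cand = "/libraries" then some "libraries"
  else if cand = "/book_types" then some "book_types"
  else if cand = "/authors" then some "authors"
  else if cand = "/publishers" then some "publishers"
  else if cand = "/books" then some "books"
  else if cand = "/online-books" then some "online_books"
  else if cand = "/external-books" then some "external_books"
  else if cand = "/reports" then some "reports"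
  else if cand = "/sozlamalar" then some "sozlamalar"
  else if cand = "/about" then some "about"
  else none

set_option maxHeartbeats 2000000 in
theorem pv_get_eq_chain (cand : String) :
    PySem.Dict.get? pvMenuByBase cand = pvChain cand := by
  have hD : pvMenuByBase = PySem.Dict.mk
      [("/users", "users"), ("/libraries", "libraries"), ("/book_types", "book_types"),
       ("/authors", "authors"), ("/publishers", "publishers"), ("/books", "books"),
       ("/online-books", "online_books"), ("/external-books", "external_books"),
       ("/reports", "reports"), ("/sozlamalar", "sozlamalar"), ("/about", "about")] := by rfl
  rw [hD]
  simp only [PySem.Dict.get?, List.find?]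
  unfold pvChain
  split_ifs with h1 h2 h3 h4 h5 h6 h7 h8 h9 h10 h11
  · simp_all
  · simp_all
  · simp_all
  · simp_all
  · simp_all
  · simp_all
  · simp_all
  · simp_all
  · simp_all
  · simp_all
  · simp_all
  ·
    have e1 : (("/users" : String) == cand) = false := beq_eq_false_iff_ne.mpr (Ne.symm h1)
    have e2 : (("/libraries" : String) == cand) = false := beq_eq_false_iff_ne.mpr (Ne.symm h2)
    have e3 : (("/book_types" : String) == cand) = false := beq_eq_false_iff_ne.mpr (Ne.symm h3)
    have e4 : (("/authors" : String) == cand) = false := beq_eq_false_iff_ne.mpr (Ne.symm h4)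
    have e5 : (("/publishers" : String) == cand) = false := beq_eq_false_iff_ne.mpr (Ne.symm h5)
    have e6 : (("/books" : String) == cand) = false := beq_eq_false_iff_ne.mpr (Ne.symm h6)
    have e7 : (("/online-books" : String) == cand) = false := beq_eq_false_iff_ne.mpr (Ne.symm h7)
    have e8 : (("/external-books" : String) == cand) = false := beq_eq_false_iff_ne.mpr (Ne.symm h8)
    have e9 : (("/reports" : String) == cand) = false := beq_eq_false_iff_ne.mpr (Ne.symm h9)
    have e10 : (("/sozlamalar" : String) == cand) = false := beq_eq_false_iff_ne.mpr (Ne.symm h10)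
    have e11 : (("/about" : String) == cand) = false := beq_eq_false_iff_ne.mpr (Ne.symm h11)
    simp [e1, e2, e3, e4, e5, e6, e7, e8, e9, e10, e11]

theorem pv_scan_eq_chain (p : String) (hp : p.toList ≠ []) :
    pvMenuScan p pvMenuItems = pvChain (pvLeadingSegment p) := by
  have h1 := pv_master p "/users" "users".toList hp rfl (by decide)
  have h2 := pv_master p "/libraries" "libraries".toList hp rfl (by decide)
  have h3 := pv_master p "/book_types" "book_types".toList hp rfl (by decide)
  have h4 := pv_master p "/authors" "authors".toList hp rfl (by decide)
  have h5 := pv_master p "/publishers" "publishers".toList hp rfl (by decide)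
  have h6 := pv_master p "/books" "books".toList hp rfl (by decide)
  have h7 := pv_master p "/online-books" "online-books".toList hp rfl (by decide)
  have h8 := pv_master p "/external-books" "external-books".toList hp rfl (by decide)
  have h9 := pv_master p "/reports" "reports".toList hp rfl (by decide)
  have h10 := pv_master p "/sozlamalar" "sozlamalar".toList hp rfl (by decide)
  have h11 := pv_master p "/about" "about".toList hp rfl (by decide)
  simp only [pvMenuItems, pvMenuScan, pvChain, h1, h2, h3, h4, h5, h6, h7, h8, h9, h10, h11]
  simp

-- ===== VERDICT (by name: the statement is the Claim_ definition above) =====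
theorem menu_key_from_path_spec : Claim_equal_menu_key_from_path := by
  intro path _
  unfold Spec_menu_key_from_path menu_key_from_path menu_key_from_path_alt
  set p := PySem.Str.strip path with hpd
  by_cases h0 : p = ""
  · simp [h0]
  · by_cases h1 : p = "/"
    · simp [h1]
    · have hp : p.toList ≠ [] := fun h => h0 (String.toList_inj.mp (by simpa using h))
      simp only [if_neg h0, if_neg h1]
      rw [pv_scan_eq_chain p hp, pv_get_eq_chain]
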